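-- pv_equiv track=rewrite | github.com/Fabien-Math/HydroCognition | HC-RCNN/util.py | find_leftmost_point
-- ===== SOURCE A (Python) =====
-- def find_leftmost_point(points: list[tuple]):
--     leftmost_point = points[0]
--     for point in points[1:]:
--         if point[0] < leftmost_point[0]:
--             leftmost_point = point
--         elif point[0] == leftmost_point[0] and point[1] > leftmost_point[1]:
--             leftmost_point = point
--     return leftmost_point
-- ===== SOURCE B (Python) =====
-- def find_leftmost_point(points: list[tuple]):
--     minx = min(p[0] for p in points)
--     candidates = [p for p in points if p[0] == minx]
--     return max(candidates, key=lambda p: p[1])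
-- ===== Notes on version B (the rewrite author's own statement) =====
-- stated objective: alternative
-- what changed: Replaces A's single interleaved lexicographic scan with an aggregate-then-filter-then-reduce decomposition: first compute the minimum x, then keep only the points at that x, then take the first one with maximal y via max(key=...).
import Mathlib
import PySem

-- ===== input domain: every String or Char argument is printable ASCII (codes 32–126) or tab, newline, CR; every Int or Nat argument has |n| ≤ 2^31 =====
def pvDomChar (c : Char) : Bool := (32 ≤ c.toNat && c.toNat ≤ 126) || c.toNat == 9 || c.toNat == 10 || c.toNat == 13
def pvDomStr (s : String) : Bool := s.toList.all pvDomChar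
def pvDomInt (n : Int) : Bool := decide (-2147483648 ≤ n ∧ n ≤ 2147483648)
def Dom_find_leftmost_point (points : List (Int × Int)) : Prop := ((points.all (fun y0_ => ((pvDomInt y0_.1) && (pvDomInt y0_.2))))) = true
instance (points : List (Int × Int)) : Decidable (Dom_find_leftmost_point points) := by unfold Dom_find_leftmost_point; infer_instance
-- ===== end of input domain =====

-- B re-decomposes A's single interleaved scan into min-x, filter, then max-by-y (alternative decomposition, same cost).

-- ===== PORT A =====
-- A's loop body: keep the point with smaller x, or equal x and strictly larger y.
def flpStep (lm point : Int × Int) : Int × Int :=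
  if point.1 < lm.1 then point
  else if point.1 = lm.1 ∧ point.2 > lm.2 then point
  else lm

def find_leftmost_point (points : List (Int × Int)) : Int × Int :=
  match points with
  | [] => (0, 0)  -- Python raises IndexError here; excluded by Pre_
  | h :: t => t.foldl flpStep h   -- points[1:] is the tail

-- ===== PORT B =====
def find_leftmost_point_alt (points : List (Int × Int)) : Int × Int :=
  let minx := (PySem.List.min? (points.map Prod.fst) (fun x => x)).getD 0   -- min(p[0] for p in points); raises on [] in Python
  let candidates := points.filter (fun p => p.1 == minx)
  (PySem.List.max? candidates (fun p => p.2)).getD (0, 0)                    -- max(candidates, key=lambda p: p[1])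

-- ===== PRECONDITION & SPEC =====
-- Pre_ excludes only the empty list, on which Python A raises IndexError (and B raises ValueError).
def Pre_find_leftmost_point (points : List (Int × Int)) : Prop := points ≠ []
instance (points : List (Int × Int)) : Decidable (Pre_find_leftmost_point points) := by unfold Pre_find_leftmost_point; infer_instance
def pvWitness_find_leftmost_point : (List (Int × Int)) := [(1, 2)]

def Spec_find_leftmost_point (points : List (Int × Int)) (out : Int × Int) : Prop := out = find_leftmost_point_alt points
instance (points : List (Int × Int)) (out : Int × Int) : Decidable (Spec_find_leftmost_point points out) := by unfold Spec_find_leftmost_point; infer_instance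

-- ===== CLAIM (what is proved, stated in full; the proofs are below) =====
def Claim_equal_find_leftmost_point : Prop := ∀ (points : List (Int × Int)), Dom_find_leftmost_point points → Pre_find_leftmost_point points → Spec_find_leftmost_point points (find_leftmost_point points)

-- ===== LEMMAS AND PROOFS =====

theorem foldl_min_le_init (l : List Int) (a : Int) : l.foldl min a ≤ a := by
  induction l generalizing a with
  | nil => simp
  | cons x xs ih =>
      simp only [List.foldl]
      exact le_trans (ih (min a x)) (min_le_left a x)

-- absorbing the first step of the max?-fold for two explicit heads
theorem max?_cons₂ (a b : Int × Int) (xs : List (Int × Int)) :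
    PySem.List.max? (a :: b :: xs) (fun p => p.2) =
      PySem.List.max? ((if a.2 < b.2 then b else a) :: xs) (fun p => p.2) := by
  simp only [PySem.List.max?, List.foldl]
  split_ifs <;> rfl

-- one A-step is absorbed by B's pipeline
theorem alt_absorb (lm p : Int × Int) (t : List (Int × Int)) :
    find_leftmost_point_alt (lm :: p :: t) = find_leftmost_point_alt (flpStep lm p :: t) := by
  have hfst : (flpStep lm p).1 = min lm.1 p.1 := by
    unfold flpStep; split_ifs with h1 h2 <;> simp <;> omega
  have hminx :
      (PySem.List.min? ((lm :: p :: t).map Prod.fst) (fun x => x)).getD 0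
        = (PySem.List.min? ((flpStep lm p :: t).map Prod.fst) (fun x => x)).getD 0 := by
    simp only [List.map, PySem.List.min?_id_cons, List.foldl, hfst, Option.getD_some]
  set m := (PySem.List.min? ((lm :: p :: t).map Prod.fst) (fun x => x)).getD 0 with hm
  have hmle : m ≤ min lm.1 p.1 := by
    rw [hm]
    simp only [List.map, PySem.List.min?_id_cons, Option.getD_some, List.foldl]
    exact foldl_min_le_init _ _
  unfold find_leftmost_point_alt
  rw [← hminx, ← hm]
  unfold flpStep
  split_ifs with h1 h2
  · -- step = p because p.1 < lm.1; lm.1 ≠ m so lm is filtered out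
    have : ¬ (lm.1 == m) = true := by simp; omega
    simp only [List.filter, this]
  · -- equal x, p.2 > lm.2 : step = p
    obtain ⟨hx, hy⟩ := h2
    by_cases hlmm : lm.1 = m
    · have h1' : (lm.1 == m) = true := by simp [hlmm]
      have h2' : (p.1 == m) = true := by simp [hx, hlmm]
      simp only [List.filter, h1', h2', max?_cons₂]
      have : (lm.2 < p.2) = True := by simp; omega
      simp [this]
    · have h1' : ¬ (lm.1 == m) = true := by simp [hlmm]
      have h2' : ¬ (p.1 == m) = true := by simp [hx ▸ hlmm]
      simp only [List.filter, h1', h2']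
  · -- step = lm
    by_cases hx : p.1 = lm.1
    · -- tie in x with p.2 ≤ lm.2
      have hy : ¬ lm.2 < p.2 := by
        intro hc; exact h2 ⟨hx, hc⟩
      by_cases hlmm : lm.1 = m
      · have h1' : (lm.1 == m) = true := by simp [hlmm]
        have h2' : (p.1 == m) = true := by simp [hx, hlmm]
        simp only [List.filter, h1', h2', max?_cons₂]
        simp [hy]
      · have h1' : ¬ (lm.1 == m) = true := by simp [hlmm]
        have h2' : ¬ (p.1 == m) = true := by simp [hx ▸ hlmm]
        simp only [List.filter, h1', h2']
    · -- lm.1 < p.1 strictly, so p is filtered out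
      have hlt : lm.1 < p.1 := by omega
      have h2' : ¬ (p.1 == m) = true := by simp; omega
      simp only [List.filter, h2']

-- B on (lm :: t) equals A's fold started at lm
theorem alt_eq_foldl (t : List (Int × Int)) : ∀ lm : Int × Int,
    find_leftmost_point_alt (lm :: t) = t.foldl flpStep lm := by
  induction t with
  | nil =>
      intro lm
      simp [find_leftmost_point_alt, PySem.List.min?, PySem.List.max?, List.filter]
  | cons p t ih =>
      intro lm
      rw [alt_absorb, ih (flpStep lm p)]
      rfl

-- ===== VERDICT (by name: the statement is the Claim_ definition above) =====
theorem find_leftmost_point_spec : Claim_equal_find_leftmost_point := by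
  intro points _ hpre
  match points with
  | [] => exact absurd rfl hpre
  | h :: t =>
      unfold Spec_find_leftmost_point find_leftmost_point
      exact (alt_eq_foldl t h).symm
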